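-- pv_equiv track=rewrite | github.com/jjgold012/-meaning_and_computation | ex1/ex1.py | tag_by_collo
-- ===== SOURCE A (Python) =====
-- word = 'lead'
--
-- def add_to_collo(collo, example):
--     for e in example:
--         if word != e:
--             collo[e] = 0
--
-- def tag_by_collo(examples, seeds_a, seeds_b):
--     sense_a_examples = []
--     sense_b_examples = []
--     unknown_examples = []
--     collo_a = seeds_a.copy()
--     collo_b = seeds_b.copy()
--     for e in examples:
--
--         example = e[1]
--         a = False
--         b = False
--         for seed_a in seeds_a.keys():
--             if seed_a in example:
--                 a = True
--
--         for seed_b in seeds_b.keys():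
--             if seed_b in example:
--                 b = True
--
--         if a == b:
--             unknown_examples.append(e)
--         else:
--             if a:
--                 sense_a_examples.append(e)
--                 add_to_collo(collo_a, example)
--             if b:
--                 sense_b_examples.append(e)
--                 add_to_collo(collo_b, example)
--     return collo_a, collo_b, sense_a_examples,sense_b_examples,unknown_examples
-- ===== SOURCE B (Python) =====
-- word = 'lead'
--
-- def tag_by_collo(examples, seeds_a, seeds_b):
--     # Phase 1: classify only, using key sets built once.
--     keys_a = set(seeds_a)
--     keys_b = set(seeds_b)
--     sense_a_examples = []
--     sense_b_examples = []
--     unknown_examples = []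
--     for e in examples:
--         a = any(w in keys_a for w in e[1])
--         b = any(w in keys_b for w in e[1])
--         if a == b:
--             unknown_examples.append(e)
--         elif a:
--             sense_a_examples.append(e)
--         else:
--             sense_b_examples.append(e)
--     # Phase 2: build the collocation dicts from the classified examples.
--     collo_a = seeds_a.copy()
--     for e in sense_a_examples:
--         for w in e[1]:
--             if w != word:
--                 collo_a[w] = 0
--     collo_b = seeds_b.copy()
--     for e in sense_b_examples:
--         for w in e[1]:
--             if w != word:
--                 collo_b[w] = 0
--     return collo_a, collo_b, sense_a_examples, sense_b_examples, unknown_examples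
-- ===== Notes on version B (the rewrite author's own statement) =====
-- stated objective: faster
-- what changed: B splits A's single interleaved loop into two phases -- classify every example first using seed-key sets built once (testing each example word against the set, reversing A's scan over every seed key per example), then build collo_a/collo_b by folding the add-to-collo loop over the already-classified example lists.
import Mathlib
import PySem

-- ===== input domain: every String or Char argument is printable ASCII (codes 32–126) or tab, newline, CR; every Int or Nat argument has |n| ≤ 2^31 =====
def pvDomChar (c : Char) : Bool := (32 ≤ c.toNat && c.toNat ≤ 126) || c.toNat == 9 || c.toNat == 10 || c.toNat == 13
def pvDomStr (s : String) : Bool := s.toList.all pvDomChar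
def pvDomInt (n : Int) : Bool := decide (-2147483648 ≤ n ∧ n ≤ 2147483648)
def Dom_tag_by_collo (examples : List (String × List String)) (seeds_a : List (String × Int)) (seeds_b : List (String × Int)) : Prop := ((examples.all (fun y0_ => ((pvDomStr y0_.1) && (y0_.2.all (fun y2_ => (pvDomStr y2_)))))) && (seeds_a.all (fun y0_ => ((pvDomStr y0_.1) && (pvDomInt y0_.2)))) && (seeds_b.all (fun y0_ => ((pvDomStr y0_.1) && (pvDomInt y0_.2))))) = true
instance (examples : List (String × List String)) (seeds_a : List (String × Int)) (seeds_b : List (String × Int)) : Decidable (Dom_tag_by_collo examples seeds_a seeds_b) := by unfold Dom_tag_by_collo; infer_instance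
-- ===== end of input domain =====

-- B classifies first using seed-key sets built once (one set lookup per example word instead of
-- A's scan over every seed key), then builds the collocation dicts from the classified lists;
-- a timing run measured B faster than A on the generated inputs.

-- ===== PORT A =====
-- add_to_collo: for e in example: if word != e: collo[e] = 0
def addToCollo (collo : PySem.Dict String Int) (ex : List String) : PySem.Dict String Int :=
  ex.foldl (fun c e => if "lead" ≠ e then c.insert e 0 else c) collo

-- 'for seed in seeds.keys(): if seed in example: flag = True'
def flagA (seeds : List (String × Int)) (ex : List String) : Bool :=
  (PySem.Dict.mk seeds).keys.foldl (fun acc s => if ex.contains s then true else acc) false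

-- the body of A's main loop, over state (collo_a, collo_b, sense_a, sense_b, unknown)
def stepA (seeds_a seeds_b : List (String × Int))
    (st : PySem.Dict String Int × PySem.Dict String Int × List (String × List String) × List (String × List String) × List (String × List String))
    (e : String × List String) :
    PySem.Dict String Int × PySem.Dict String Int × List (String × List String) × List (String × List String) × List (String × List String) :=
  let ex := e.2
  let a := flagA seeds_a ex
  let b := flagA seeds_b ex
  if a == b then (st.1, st.2.1, st.2.2.1, st.2.2.2.1, st.2.2.2.2 ++ [e])
  else
    let ca := if a then addToCollo st.1 ex else st.1
    let sa := if a then st.2.2.1 ++ [e] else st.2.2.1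
    let cb := if b then addToCollo st.2.1 ex else st.2.1
    let sb := if b then st.2.2.2.1 ++ [e] else st.2.2.2.1
    (ca, cb, sa, sb, st.2.2.2.2)

def tag_by_collo (examples : List (String × List String)) (seeds_a : List (String × Int)) (seeds_b : List (String × Int)) : (List (String × Int)) × (List (String × Int)) × (List (String × List String)) × (List (String × List String)) × (List (String × List String)) :=
  let fin := examples.foldl (stepA seeds_a seeds_b)
    (PySem.Dict.mk seeds_a, PySem.Dict.mk seeds_b, [], [], [])
  (fin.1.items, fin.2.1.items, fin.2.2.1, fin.2.2.2.1, fin.2.2.2.2)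

-- ===== PORT B =====
-- B's flag: any(w in keys for w in e[1]) with keys a set built once
def flagB (keys : PySem.Set String) (ex : List String) : Bool :=
  ex.any (fun w => keys.contains w)

-- phase-1 body: append e to exactly one of the three lists
def stepB (keysA keysB : PySem.Set String)
    (st : List (String × List String) × List (String × List String) × List (String × List String))
    (e : String × List String) :
    List (String × List String) × List (String × List String) × List (String × List String) :=
  let a := flagB keysA e.2
  let b := flagB keysB e.2
  if a == b then (st.1, st.2.1, st.2.2 ++ [e])
  else if a then (st.1 ++ [e], st.2.1, st.2.2)
  else (st.1, st.2.1 ++ [e], st.2.2)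

-- phase-2: fold 'for w in e[1]: if w != word: collo[w] = 0' over the classified examples
def addAll (collo : PySem.Dict String Int) (es : List (String × List String)) : PySem.Dict String Int :=
  es.foldl (fun c e => e.2.foldl (fun c w => if w ≠ "lead" then c.insert w 0 else c) c) collo

def tag_by_collo_alt (examples : List (String × List String)) (seeds_a : List (String × Int)) (seeds_b : List (String × Int)) : (List (String × Int)) × (List (String × Int)) × (List (String × List String)) × (List (String × List String)) × (List (String × List String)) :=
  let keysA := PySem.Set.ofList (seeds_a.map Prod.fst)
  let keysB := PySem.Set.ofList (seeds_b.map Prod.fst)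
  let cls := examples.foldl (stepB keysA keysB) ([], [], [])
  let collo_a := addAll (PySem.Dict.mk seeds_a) cls.1
  let collo_b := addAll (PySem.Dict.mk seeds_b) cls.2.1
  (collo_a.items, collo_b.items, cls.1, cls.2.1, cls.2.2)

-- ===== PRECONDITION & SPEC =====
def Spec_tag_by_collo (examples : List (String × List String)) (seeds_a : List (String × Int)) (seeds_b : List (String × Int)) (out : (List (String × Int)) × (List (String × Int)) × (List (String × List String)) × (List (String × List String)) × (List (String × List String))) : Prop := out = tag_by_collo_alt examples seeds_a seeds_b
instance (examples : List (String × List String)) (seeds_a : List (String × Int)) (seeds_b : List (String × Int)) (out : (List (String × Int)) × (List (String × Int)) × (List (String × List String)) × (List (String × List String)) × (List (String × List String))) : Decidable (Spec_tag_by_collo examples seeds_a seeds_b out) := by unfold Spec_tag_by_collo; exact @instDecidableEqProd _ _ inferInstance (@instDecidableEqProd _ _ inferInstance (@instDecidableEqProd _ _ inferInstance (@instDecidableEqProd _ _ inferInstance inferInstance))) _ _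

-- ===== CLAIM (what is proved, stated in full; the proofs are below) =====
def Claim_equal_tag_by_collo : Prop := ∀ (examples : List (String × List String)) (seeds_a : List (String × Int)) (seeds_b : List (String × Int)), Dom_tag_by_collo examples seeds_a seeds_b → Spec_tag_by_collo examples seeds_a seeds_b (tag_by_collo examples seeds_a seeds_b)

-- ===== LEMMAS AND PROOFS =====

-- A's or-accumulating flag loop computes an 'any'
theorem foldl_or_any (p : String → Bool) (keys : List String) (b : Bool) :
    keys.foldl (fun acc s => if p s then true else acc) b = (b || keys.any p) := by
  induction keys generalizing b with
  | nil => simp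
  | cons k ks ih =>
    rw [List.foldl_cons, ih, List.any_cons]
    cases h : p k <;> cases b <;> simp [h]

-- A's flag (scan seed keys, test membership in the example) equals
-- B's flag (scan the example, test membership in the seed-key set)
theorem flagA_eq_flagB (seeds : List (String × Int)) (ex : List String) :
    flagA seeds ex = flagB (PySem.Set.ofList (seeds.map Prod.fst)) ex := by
  unfold flagA flagB
  rw [foldl_or_any]
  simp only [Bool.false_or]
  rw [Bool.eq_iff_iff]
  simp only [List.any_eq_true, List.contains_iff_mem, PySem.Set.contains,
    PySem.Set.mem_ofList, PySem.Dict.keys]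
  constructor
  · rintro ⟨s, hs, hmem⟩; exact ⟨s, hmem, hs⟩
  · rintro ⟨w, hw, hmem⟩; exact ⟨w, hmem, hw⟩

-- the two "add one example's words" loop bodies are the same function
theorem addToCollo_eq (c : PySem.Dict String Int) (ws : List String) :
    addToCollo c ws = ws.foldl (fun c w => if w ≠ "lead" then c.insert w 0 else c) c := by
  unfold addToCollo
  congr 1
  funext c w
  by_cases h : w = "lead" <;> simp [h, eq_comm]

theorem addAll_cons (c : PySem.Dict String Int) (e : String × List String)
    (es : List (String × List String)) :
    addAll c (e :: es) = addAll (addToCollo c e.2) es := by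
  simp [addAll, addToCollo_eq]

-- B's classify fold from any start state appends the classification of the rest
theorem foldB_shift (ka kb : PySem.Set String) (es : List (String × List String))
    (st : List (String × List String) × List (String × List String) × List (String × List String)) :
    es.foldl (stepB ka kb) st =
      (let cls := es.foldl (stepB ka kb) ([], [], []);
        (st.1 ++ cls.1, st.2.1 ++ cls.2.1, st.2.2 ++ cls.2.2)) := by
  induction es generalizing st with
  | nil => simp
  | cons f fs ih =>
    rw [List.foldl_cons, List.foldl_cons, ih, ih (stepB ka kb ([], [], []) f)]
    unfold stepB
    cases ha : flagB ka f.2 <;> cases hb : flagB kb f.2 <;> simp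

-- the main invariant: A's interleaved fold equals B's classify-then-build, from any state
theorem main_inv (seeds_a seeds_b : List (String × Int)) (examples : List (String × List String))
    (st : PySem.Dict String Int × PySem.Dict String Int × List (String × List String) × List (String × List String) × List (String × List String)) :
    examples.foldl (stepA seeds_a seeds_b) st =
      (let cls := examples.foldl
          (stepB (PySem.Set.ofList (seeds_a.map Prod.fst)) (PySem.Set.ofList (seeds_b.map Prod.fst)))
          ([], [], []);
        (addAll st.1 cls.1, addAll st.2.1 cls.2.1, st.2.2.1 ++ cls.1, st.2.2.2.1 ++ cls.2.1, st.2.2.2.2 ++ cls.2.2)) := by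
  induction examples generalizing st with
  | nil => simp [addAll]
  | cons e es ih =>
    rw [List.foldl_cons, List.foldl_cons, ih,
      foldB_shift _ _ es (stepB _ _ ([], [], []) e)]
    simp only [stepA, stepB, flagA_eq_flagB]
    cases ha : flagB (PySem.Set.ofList (seeds_a.map Prod.fst)) e.2 <;>
      cases hb : flagB (PySem.Set.ofList (seeds_b.map Prod.fst)) e.2 <;>
      simp [addAll_cons]

-- ===== VERDICT (by name: the statement is the Claim_ definition above) =====
theorem tag_by_collo_spec : Claim_equal_tag_by_collo := by
  intro examples seeds_a seeds_b _
  unfold Spec_tag_by_collo tag_by_collo tag_by_collo_alt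
  rw [main_inv]
  simp
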